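-- pv_equiv track=rewrite | github.com/felyppepardino/avaliacao-recursao | main.py | g_alt
-- ===== SOURCE A (Python) =====
-- def g_alt(n):
--     if n == 1:
--         T = 1
--     elif n == 2:
--         T = 2
--     elif n == 3:
--         T = 3
--     else:
--         T = g_alt(n - 1) + 2 * g_alt(n - 2) + 3 * g_alt(n - 3)
--     return T
-- ===== SOURCE B (Python) =====
-- def g_alt(n):
--     a, b, c = 1, 2, 3
--     if n == 1:
--         return a
--     if n == 2:
--         return b
--     for _ in range(n - 3):
--         a, b, c = b, c, c + 2 * b + 3 * a
--     return c
-- ===== Notes on version B (the rewrite author's own statement) =====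
-- stated objective: faster
-- what changed: Replaced the exponential triple recursion with a bottom-up loop keeping three rolling variables; intended as asymptotically faster, and a timing run observed A timing out where B returned instantly.
-- outside the precondition, e.g. on g_alt(0): A raises RecursionError, B returns 3
import Mathlib
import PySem

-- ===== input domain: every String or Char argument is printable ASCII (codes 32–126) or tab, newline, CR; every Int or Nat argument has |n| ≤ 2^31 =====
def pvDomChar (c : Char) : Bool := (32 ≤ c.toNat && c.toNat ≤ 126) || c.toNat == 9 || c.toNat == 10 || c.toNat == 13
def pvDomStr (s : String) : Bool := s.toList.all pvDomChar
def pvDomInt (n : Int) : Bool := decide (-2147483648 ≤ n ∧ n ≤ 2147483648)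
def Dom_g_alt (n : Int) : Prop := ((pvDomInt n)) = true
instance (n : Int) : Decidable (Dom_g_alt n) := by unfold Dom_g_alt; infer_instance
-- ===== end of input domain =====

-- B replaces A's exponential triple recursion with a bottom-up loop over three rolling variables (intended as asymptotically faster; see the timing label).

-- ===== PORT A =====
-- A's recursion, on the Nat magnitude of n (Pre_ restricts to n ≥ 1, where this matches Python A exactly)
def gAuxA : Nat → Int
  | 0 => 0          -- unreachable under Pre_g_alt
  | 1 => 1
  | 2 => 2
  | 3 => 3
  | (m + 4) => gAuxA (m + 3) + 2 * gAuxA (m + 2) + 3 * gAuxA (m + 1)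

def g_alt (n : Int) : Int := gAuxA n.toNat

-- ===== PORT B =====
-- the for-loop of Source B: k remaining iterations over state (a, b, c)
def gLoopB : Nat → Int × Int × Int → Int × Int × Int
  | 0, s => s
  | (k + 1), (a, b, c) => gLoopB k (b, c, c + 2 * b + 3 * a)

def g_alt_alt (n : Int) : Int :=
  if n == 1 then 1
  else if n == 2 then 2
  else (gLoopB (n - 3).toNat (1, 2, 3)).2.2

-- ===== PRECONDITION & SPEC =====
-- Pre_ excludes n ≤ 0, on which Python A recurses without a base case and raises RecursionError.
def Pre_g_alt (n : Int) : Prop := 1 ≤ n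
instance (n : Int) : Decidable (Pre_g_alt n) := by unfold Pre_g_alt; infer_instance
def pvWitness_g_alt : Int := 5

def Spec_g_alt (n : Int) (out : Int) : Prop := out = g_alt_alt n
instance (n : Int) (out : Int) : Decidable (Spec_g_alt n out) := by unfold Spec_g_alt; infer_instance

-- ===== CLAIM (what is proved, stated in full; the proofs are below) =====
def Claim_equal_g_alt : Prop := ∀ (n : Int), Dom_g_alt n → Pre_g_alt n → Spec_g_alt n (g_alt n)

-- ===== LEMMAS AND PROOFS =====

-- loop invariant: starting from three consecutive values of the sequence, the loop advances along it
theorem gLoopB_inv (k m : Nat) :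
    gLoopB k (gAuxA (m + 1), gAuxA (m + 2), gAuxA (m + 3))
      = (gAuxA (m + k + 1), gAuxA (m + k + 2), gAuxA (m + k + 3)) := by
  induction k generalizing m with
  | zero => simp [gLoopB]
  | succ k ih =>
    have : gAuxA (m + 3) + 2 * gAuxA (m + 2) + 3 * gAuxA (m + 1) = gAuxA (m + 4) := by
      simp [gAuxA]
    rw [gLoopB, this]
    have h := ih (m + 1)
    simpa [Nat.add_assoc, Nat.add_comm, Nat.add_left_comm] using h

theorem gAux_eq_loop (k : Nat) : gAuxA (k + 3) = (gLoopB k (1, 2, 3)).2.2 := by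
  have h := gLoopB_inv k 0
  simp [gAuxA] at h
  simp [h]

-- ===== VERDICT (by name: the statement is the Claim_ definition above) =====
theorem g_alt_spec : Claim_equal_g_alt := by
  intro n _ hpre
  unfold Spec_g_alt g_alt g_alt_alt
  by_cases h1 : n = 1
  · subst h1; decide
  · by_cases h2 : n = 2
    · subst h2; decide
    · simp only [h1, h2, beq_iff_eq]
      have h3 : 3 ≤ n ∨ n = 1 ∨ n = 2 := by unfold Pre_g_alt at hpre; omega
      rcases h3 with h3 | h | h
      · have hk : n.toNat = (n - 3).toNat + 3 := by omega
        rw [hk]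
        exact gAux_eq_loop _
      · exact absurd h h1
      · exact absurd h h2
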